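/- GENERATED by mk_final_copies.py from the proof of the farm's unit `start_decoder.C8f` (farm:start_decoder.C8f.1: Proof.lean) as the
   re-elaboration sweep compiled it — do not edit. -/
import Vorbis.Spec.Units.start_decoder_C8f
import Vorbis.Spec.Worked.start_decoder_C8f_Lemmas

open X86 X86.User Asan Vorbis Vorbis.Spec Vorbis.Spec.StartDecoder

namespace Vorbis.Spec.start_decoder_C8f

/-- **Segment C8f of `start_decoder`** (0x114b24 – 0x114b7a, lines 3866 – 3868): from `At8F` (cut144) over the two LIFO frees
(`c8f_walk1` to cut145, `c8f_walk2` to cut146) and the store `c->codewords = NULL` (`c8f_walk3`) to `AtC9` (cut117);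
`ReachVia.trans`, no machine step here. -/
theorem c8f_seg
    (Lay : Layout) (hLay : Lay.hi = 0x1000000) (μ : Microarch) (hμ : UserX.MicroOK μ) (u₀ : State)
    (hcode : HasCodeNat Lay u₀ Vorbis.L.start_decoder.entry Vorbis.Code.code_start_decoder.nat Vorbis.L.start_decoder.size)
    (hld4 : Asan.SmallCheck Lay μ Vorbis.WayInv (Vorbis.CodeOK u₀) [.rax, .rcx, .rdx] 4 Vorbis.L.__asan_load4_noabort.entry)
    (hst8 : Asan.SmallCheck Lay μ Vorbis.WayInv (Vorbis.CodeOK u₀) [.rax, .rcx, .rdx] 8 Vorbis.L.__asan_store8_noabort.entry)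
    (hld8 : Asan.SmallCheck Lay μ Vorbis.WayInv (Vorbis.CodeOK u₀) [.rax, .rcx, .rdx] 8 Vorbis.L.__asan_load8_noabort.entry)
    (hfree : ∀ (others : List Obj) (frames : List (Nat × FrameLayout)) (A : Arena) (m : Nat) (rest : List (Nat × Nat)), Calls Lay μ Vorbis.WayInv (Vorbis.conv u₀) Vorbis.L.setup_temp_free.entry (Vorbis.Spec.setup_temp_free.spec others frames A m rest)) :
    SegC8f Lay μ u₀ := by
  intro g i v hat
  obtain ⟨A, lengths, A2, A3, Ai, h⟩ := hat
  -- cut144 = 0x114b24 → cut145 = 0x114b52 (line 3866)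
  refine (c8f_walk1 Lay hLay μ hμ u₀ hcode hld4 hld8 hfree h).trans ?_
  intro w1 hw1
  obtain ⟨A', h1⟩ := hw1
  -- cut145 = 0x114b52 → cut146 = 0x114b6a (line 3867)
  refine (c8f_walk2 Lay hLay μ hμ u₀ hcode hld4 hfree h1).trans ?_
  intro w2 hw2
  obtain ⟨A'', h2⟩ := hw2
  -- cut146 = 0x114b6a → cut117 = 0x114724 (line 3868)
  exact c8f_walk3 Lay hLay μ hμ u₀ hcode hst8 h2

end Vorbis.Spec.start_decoder_C8f

/-- The unit `start_decoder.C8f`. -/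
theorem Vorbis.Spec.Worked.start_decoder_C8f_ok : Vorbis.Spec.start_decoder_C8f.Statement := Vorbis.Spec.start_decoder_C8f.c8f_seg
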